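-- pv_equiv track=rewrite | github.com/schmijul/quantumattention | src/benchmarking.py | _shared_variants
-- ===== SOURCE A (Python) =====
-- from typing import Any, Dict, Iterable, List, Mapping, MutableMapping, Sequence
--
-- VARIANT_ORDER = [
--     "classical",
--     "quantum_embedding",
--     "quantum_attention",
--     "full_quantum",
-- ]
--
-- def _shared_variants(mode_rows: Mapping[str, Sequence[Mapping[str, Any]]]) -> List[str]:
--     variant_sets = [
--         {row["variant_key"] for row in rows}
--         for rows in mode_rows.values()
--         if rows
--     ]
--     if not variant_sets:
--         return []
--     shared = set.intersection(*variant_sets)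
--     return [variant for variant in VARIANT_ORDER if variant in shared]
-- ===== SOURCE B (Python) =====
-- from typing import Any, Dict, Iterable, List, Mapping, MutableMapping, Sequence
--
-- VARIANT_ORDER = [
--     "classical",
--     "quantum_embedding",
--     "quantum_attention",
--     "full_quantum",
-- ]
--
-- def _shared_variants(mode_rows: Mapping[str, Sequence[Mapping[str, Any]]]) -> List[str]:
--     active = [rows for rows in mode_rows.values() if rows]
--     if not active:
--         return []
--     return [
--         v
--         for v in VARIANT_ORDER
--         if all(any(row["variant_key"] == v for row in rows) for rows in active)
--     ]
-- ===== Notes on version B (the rewrite author's own statement) =====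
-- stated objective: simpler
-- what changed: Drops the per-mode set construction and the n-ary set intersection; B tests each fixed VARIANT_ORDER candidate directly against every non-empty mode with all/any.
import Mathlib
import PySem

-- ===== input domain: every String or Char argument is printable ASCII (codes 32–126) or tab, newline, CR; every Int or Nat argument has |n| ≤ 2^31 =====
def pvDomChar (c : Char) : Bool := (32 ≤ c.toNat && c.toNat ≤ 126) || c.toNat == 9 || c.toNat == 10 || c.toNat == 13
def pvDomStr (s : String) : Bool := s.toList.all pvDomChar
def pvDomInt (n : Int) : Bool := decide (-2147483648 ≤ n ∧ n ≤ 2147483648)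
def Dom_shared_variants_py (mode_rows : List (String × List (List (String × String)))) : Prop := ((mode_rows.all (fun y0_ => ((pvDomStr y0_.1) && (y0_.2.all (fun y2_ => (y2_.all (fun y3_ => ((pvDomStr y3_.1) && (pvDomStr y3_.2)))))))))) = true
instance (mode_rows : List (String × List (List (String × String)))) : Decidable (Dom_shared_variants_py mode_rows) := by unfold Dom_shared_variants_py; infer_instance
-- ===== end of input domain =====

-- B replaces A's per-mode variant sets and n-ary set intersection by a direct all/any test of each
-- fixed VARIANT_ORDER candidate against every non-empty mode (objective: simpler).

def VARIANT_ORDER : List String :=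
  ["classical", "quantum_embedding", "quantum_attention", "full_quantum"]

-- row["variant_key"] (Pre_ guarantees the key is present; "" is never read inside Pre_)
def vkey (row : List (String × String)) : String :=
  (PySem.Dict.ofList row).getD "variant_key" ""

-- ===== PORT A =====
def shared_variants_py (mode_rows : List (String × List (List (String × String)))) : List String :=
  let variant_sets : List (PySem.Set String) :=
    (mode_rows.filter (fun p => !p.2.isEmpty)).map
      (fun p => PySem.Set.ofList (p.2.map vkey))
  match variant_sets with
  | [] => []
  | s :: rest =>
    let shared := rest.foldl PySem.Set.inter s
    VARIANT_ORDER.filter (fun v => PySem.Set.contains shared v)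

-- ===== PORT B =====
def shared_variants_py_alt (mode_rows : List (String × List (List (String × String)))) : List String :=
  let active := (mode_rows.map (·.2)).filter (fun rows => !rows.isEmpty)
  if active.isEmpty then []
  else
    VARIANT_ORDER.filter
      (fun v => active.all (fun rows => rows.any (fun row => vkey row == v)))

-- ===== PRECONDITION & SPEC =====
-- Pre_ excludes exactly the inputs where some row lacks the "variant_key" key, on which A raises KeyError.
def Pre_shared_variants_py (mode_rows : List (String × List (List (String × String)))) : Prop :=
  (mode_rows.all (fun p => p.2.all (fun row => (PySem.Dict.ofList row).contains "variant_key"))) = true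
instance (mode_rows : List (String × List (List (String × String)))) : Decidable (Pre_shared_variants_py mode_rows) := by unfold Pre_shared_variants_py; infer_instance

def pvWitness_shared_variants_py : (List (String × List (List (String × String)))) :=
  [("full", [[("variant_key", "classical")], [("variant_key", "full_quantum")]]),
   ("lite", [[("variant_key", "classical")]]),
   ("off", [])]

def Spec_shared_variants_py (mode_rows : List (String × List (List (String × String)))) (out : List String) : Prop := out = shared_variants_py_alt mode_rows
instance (mode_rows : List (String × List (List (String × String)))) (out : List String) : Decidable (Spec_shared_variants_py mode_rows out) := by unfold Spec_shared_variants_py; infer_instance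

-- ===== CLAIM (what is proved, stated in full; the proofs are below) =====
def Claim_equal_shared_variants_py : Prop := ∀ (mode_rows : List (String × List (List (String × String)))), Dom_shared_variants_py mode_rows → Pre_shared_variants_py mode_rows → Spec_shared_variants_py mode_rows (shared_variants_py mode_rows)

-- ===== LEMMAS AND PROOFS =====

lemma mem_foldl_inter {α : Type} [BEq α] [LawfulBEq α] (rest : List (PySem.Set α)) (s : PySem.Set α) (v : α) :
    v ∈ rest.foldl PySem.Set.inter s ↔ v ∈ s ∧ ∀ t ∈ rest, v ∈ t := by
  induction rest generalizing s with
  | nil => simp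
  | cons t ts ih =>
    simp [List.foldl_cons, ih, PySem.Set.mem_inter]
    tauto

theorem shared_variants_py_spec : Claim_equal_shared_variants_py := by
  intro mode_rows _ _
  unfold Spec_shared_variants_py shared_variants_py shared_variants_py_alt
  have hfm : (mode_rows.map (·.2)).filter (fun rows => !rows.isEmpty)
      = (mode_rows.filter (fun p => !p.2.isEmpty)).map (·.2) := by
    rw [List.filter_map]; rfl
  cases hpa : mode_rows.filter (fun p => !p.2.isEmpty) with
  | nil => simp [hfm, hpa]
  | cons p ps =>
    simp only [hfm, hpa, List.map_cons, List.isEmpty_cons, Bool.false_eq_true,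
      if_false]
    apply List.filter_congr
    intro v _
    rw [Bool.eq_iff_iff]
    simp only [PySem.Set.contains_iff, mem_foldl_inter, PySem.Set.mem_ofList, List.mem_map,
      List.all_cons, Bool.and_eq_true, List.all_eq_true, List.any_eq_true, beq_iff_eq]
    refine and_congr_right fun _ => ?_
    constructor
    · rintro h x ⟨a, ha, rfl⟩
      simpa [PySem.Set.mem_ofList, List.mem_map] using h _ ⟨a, ha, rfl⟩
    · rintro h t ⟨a, ha, rfl⟩
      simp only [PySem.Set.mem_ofList, List.mem_map]
      exact h _ ⟨a, ha, rfl⟩
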